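-- pv_equiv track=rewrite | github.com/ebarschkis/ErdosProblem | Problem347/paper_sequence_density.py | greedy_expansion
-- ===== SOURCE A (Python) =====
-- import bisect
-- from typing import Dict, List, Optional, Tuple
--
-- def greedy_digit(x: int, b_list: List[int]) -> int:
--     idx = bisect.bisect_right(b_list, x)
--     return b_list[idx - 1]
--
-- def greedy_expansion(
--     m: int, n0: int, n_max: int, b_lists: Dict[int, List[int]]
-- ) -> Tuple[List[int], int]:
--     r = m
--     digits = []
--     for n in range(n_max, n0 - 1, -1):
--         b_n = greedy_digit(r, b_lists[n])
--         digits.append(b_n)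
--         r -= b_n
--     digits.reverse()
--     return digits, r
-- ===== SOURCE B (Python) =====
-- def greedy_expansion(m, n0, n_max, b_lists):
--     r = m
--     digits = []
--     for n in range(n_max, n0 - 1, -1):
--         lst = b_lists[n]
--         # linear break-scan: k = index of first element > r (list is sorted)
--         k = 0
--         for v in lst:
--             if v <= r:
--                 k += 1
--             else:
--                 break
--         d = lst[k - 1]
--         digits = [d] + digits  # prepend: digits come out in final order, no reverse
--         r -= d
--     return digits, r
-- ===== Notes on version B (the rewrite author's own statement) =====
-- stated objective: alternative
-- what changed: Replaces the bisect binary search by a single linear break-scan counting leading elements <= r, and builds the digit list front-to-back by prepending so the final reverse disappears.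
-- outside the precondition, e.g. on greedy_expansion(1, 0, 0, {0: [2, 0, 3]}): A returns ([0], 1), B returns ([3], -2)
import Mathlib
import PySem

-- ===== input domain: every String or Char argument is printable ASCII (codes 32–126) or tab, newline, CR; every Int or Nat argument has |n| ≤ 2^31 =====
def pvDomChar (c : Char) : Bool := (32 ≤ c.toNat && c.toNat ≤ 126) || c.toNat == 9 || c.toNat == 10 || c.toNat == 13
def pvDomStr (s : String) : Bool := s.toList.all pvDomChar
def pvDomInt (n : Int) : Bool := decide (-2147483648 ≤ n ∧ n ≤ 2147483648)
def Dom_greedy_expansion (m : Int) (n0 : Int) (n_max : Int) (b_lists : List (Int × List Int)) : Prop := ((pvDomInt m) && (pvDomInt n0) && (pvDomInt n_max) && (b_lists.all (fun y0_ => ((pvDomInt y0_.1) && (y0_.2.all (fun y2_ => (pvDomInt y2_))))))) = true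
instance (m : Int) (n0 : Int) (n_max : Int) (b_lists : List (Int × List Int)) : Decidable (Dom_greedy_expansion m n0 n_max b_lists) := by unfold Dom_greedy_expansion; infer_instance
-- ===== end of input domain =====

-- B replaces A's bisect binary search with a linear break-scan and prepends digits
-- (no final reverse): an alternative algorithm of the same result, not claimed faster.

-- ===== PORT A =====
-- literal port of bisect.bisect_right's binary search (lo/hi loop)
def pyBisectRight (a : List Int) (x : Int) (lo hi : Nat) : Nat :=
  if _h : lo < hi then
    let mid := (lo + hi) / 2
    if x < a.getD mid 0 then pyBisectRight a x lo mid
    else pyBisectRight a x (mid + 1) hi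
  else lo
termination_by hi - lo
decreasing_by all_goals omega

def greedy_digit (x : Int) (b_list : List Int) : Int :=
  let idx := pyBisectRight b_list x 0 b_list.length
  (PySem.List.pyGet? b_list ((idx : Int) - 1)).getD 0

def greedy_expansion (m : Int) (n0 : Int) (n_max : Int) (b_lists : List (Int × List Int)) : List Int × Int :=
  let st := (PySem.List.pyRange n_max (n0 - 1) (-1)).foldl
    (fun (st : List Int × Int) (n : Int) =>
      let b_n := greedy_digit st.2 (((PySem.Dict.mk b_lists).get? n).getD [])
      (st.1 ++ [b_n], st.2 - b_n)) ([], m)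
  (st.1.reverse, st.2)

-- ===== PORT B =====
-- linear break-scan: number of leading elements ≤ r
def countLE (r : Int) : List Int → Nat
  | [] => 0
  | v :: t => if v ≤ r then countLE r t + 1 else 0

def pickDigit (r : Int) (lst : List Int) : Int :=
  (PySem.List.pyGet? lst ((countLE r lst : Int) - 1)).getD 0

def greedy_expansion_alt (m : Int) (n0 : Int) (n_max : Int) (b_lists : List (Int × List Int)) : List Int × Int :=
  (PySem.List.pyRange n_max (n0 - 1) (-1)).foldl
    (fun (st : List Int × Int) (n : Int) =>
      let d := pickDigit st.2 (((PySem.Dict.mk b_lists).get? n).getD [])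
      (d :: st.1, st.2 - d)) ([], m)

-- ===== PRECONDITION & SPEC =====
-- Pre_ excludes inputs where A raises (a missing key for some n in [n0,n_max], or an
-- empty digit list: KeyError/IndexError) and inputs whose used b_list is unsorted,
-- violating bisect_right's documented sortedness precondition, a corner on which any
-- returned digit is unspecified and A's and B's choices are equally defensible.
def pvOkList (o : Option (List Int)) : Bool :=
  match o with
  | none => false
  | some l => !l.isEmpty && decide (l.Pairwise (· ≤ ·))

def Pre_greedy_expansion (m : Int) (n0 : Int) (n_max : Int) (b_lists : List (Int × List Int)) : Prop :=
  n_max < n0 ∨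
  ((n_max - n0 + 1 =
      (((b_lists.map Prod.fst).dedup.filter (fun k => decide (n0 ≤ k) && decide (k ≤ n_max))).length : Int)) ∧
   ∀ p ∈ b_lists, n0 ≤ p.1 → p.1 ≤ n_max → pvOkList ((PySem.Dict.mk b_lists).get? p.1) = true)
instance (m : Int) (n0 : Int) (n_max : Int) (b_lists : List (Int × List Int)) : Decidable (Pre_greedy_expansion m n0 n_max b_lists) := by unfold Pre_greedy_expansion; infer_instance

def pvWitness_greedy_expansion : Int × Int × Int × (List (Int × List Int)) :=
  (5, 0, 1, [(0, [1, 2]), (1, [1, 3])])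

def Spec_greedy_expansion (m : Int) (n0 : Int) (n_max : Int) (b_lists : List (Int × List Int)) (out : List Int × Int) : Prop := out = greedy_expansion_alt m n0 n_max b_lists
instance (m : Int) (n0 : Int) (n_max : Int) (b_lists : List (Int × List Int)) (out : List Int × Int) : Decidable (Spec_greedy_expansion m n0 n_max b_lists out) := by unfold Spec_greedy_expansion; infer_instance

-- ===== CLAIM (what is proved, stated in full; the proofs are below) =====
def Claim_equal_greedy_expansion : Prop := ∀ (m : Int) (n0 : Int) (n_max : Int) (b_lists : List (Int × List Int)), Dom_greedy_expansion m n0 n_max b_lists → Pre_greedy_expansion m n0 n_max b_lists → Spec_greedy_expansion m n0 n_max b_lists (greedy_expansion m n0 n_max b_lists)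

-- ===== LEMMAS AND PROOFS =====

lemma countLE_le_length (r : Int) (l : List Int) : countLE r l ≤ l.length := by
  induction l with
  | nil => simp [countLE]
  | cons v t ih => simp only [countLE, List.length_cons]; split <;> omega

-- characterisation of the break-scan on a sorted list
lemma countLE_char (r : Int) (l : List Int) (hs : l.Pairwise (· ≤ ·)) :
    ∀ i, i < l.length → ((l.getD i 0 ≤ r) ↔ i < countLE r l) := by
  induction l with
  | nil => intro i hi; simp at hi
  | cons v t ih =>
    rcases List.pairwise_cons.mp hs with ⟨hv, ht⟩
    intro i hi
    cases i with
    | zero =>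
      simp only [List.getD, countLE]
      split
      · simp [*]
      · simp_all
    | succ j =>
      simp only [List.getD_cons_succ, countLE]
      by_cases hvr : v ≤ r
      · rw [if_pos hvr]
        have h2 := ih ht j (by simpa using hi)
        constructor
        · intro hle; have := h2.mp hle; omega
        · intro hlt; exact h2.mpr (by omega)
      · rw [if_neg hvr]
        have hj : j < t.length := by simpa using hi
        have hmem : t.getD j 0 ∈ t := by
          rw [List.getD_eq_getElem t 0 hj]; exact List.getElem_mem hj
        have hv2 : v ≤ t.getD j 0 := hv _ hmem
        constructor
        · intro hle; omega
        · intro h0; omega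

lemma bisect_eq (l : List Int) (x : Int) (k : Nat)
    (hk : ∀ i, i < l.length → ((l.getD i 0 ≤ x) ↔ i < k)) :
    ∀ lo hi, lo ≤ k → k ≤ hi → hi ≤ l.length → pyBisectRight l x lo hi = k := by
  intro lo hi
  induction lo, hi using pyBisectRight.induct (a := l) (x := x) with
  | case1 lo hi h mid hlt ih =>
    intro h1 h2 h3
    rw [pyBisectRight]
    simp only [dif_pos h]
    have hmidlt : mid < hi := by simp only [mid]; omega
    have hc := hk mid (by omega)
    rw [if_pos hlt]
    exact ih (by have := hc.mp; omega) (by simp only [mid]; omega) (by omega)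
  | case2 lo hi h mid hge ih =>
    intro h1 h2 h3
    rw [pyBisectRight]
    simp only [dif_pos h]
    have hmidlt : mid < hi := by simp only [mid]; omega
    have hc := hk mid (by omega)
    rw [if_neg hge]
    have : mid < k := hc.mp (by omega)
    exact ih (by omega) h2 h3
  | case3 lo hi h =>
    intro h1 h2 h3
    rw [pyBisectRight]
    simp only [dif_neg h]
    omega

lemma greedy_digit_eq_pickDigit (x : Int) (l : List Int)
    (_hne : l ≠ []) (hs : l.Pairwise (· ≤ ·)) :
    greedy_digit x l = pickDigit x l := by
  have h := bisect_eq l x (countLE x l) (countLE_char x l hs) 0 l.length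
    (Nat.zero_le _) (countLE_le_length x l) le_rfl
  simp [greedy_digit, pickDigit, h]

-- the common recursive spec (digits in processing order), used only in proofs
def pvRun (b_lists : List (Int × List Int)) (r : Int) : List Int → List Int × Int
  | [] => ([], r)
  | n :: t =>
    let d := pickDigit r (((PySem.Dict.mk b_lists).get? n).getD [])
    let rest := pvRun b_lists (r - d) t
    (d :: rest.1, rest.2)

-- the per-key Pre_ implies the loop-range condition (pigeonhole on the interval)
lemma pre_to_range (n0 n_max : Int) (b_lists : List (Int × List Int))
    (h : Pre_greedy_expansion 0 n0 n_max b_lists) :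
    ∀ n ∈ PySem.List.pyRange n_max (n0 - 1) (-1),
      pvOkList ((PySem.Dict.mk b_lists).get? n) = true := by
  rcases h with h | ⟨hcard, hok⟩
  · intro n hn
    rw [PySem.List.pyRange_neg_one_eq_nil (by omega)] at hn
    simp at hn
  · intro n hn
    rw [PySem.List.mem_pyRange_neg_one] at hn
    set S := (b_lists.map Prod.fst).dedup.filter
      (fun k => decide (n0 ≤ k) && decide (k ≤ n_max)) with hS
    have hnd : S.Nodup := ((b_lists.map Prod.fst).nodup_dedup).filter _
    have hsub : S.toFinset ⊆ Finset.Icc n0 n_max := by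
      intro x hx
      rw [List.mem_toFinset] at hx
      rw [hS, List.mem_filter] at hx
      simp only [Bool.and_eq_true, decide_eq_true_eq] at hx
      exact Finset.mem_Icc.mpr hx.2
    have hcards : (Finset.Icc n0 n_max).card ≤ S.toFinset.card := by
      rw [List.toFinset_card_of_nodup hnd, Int.card_Icc]
      omega
    have heq : S.toFinset = Finset.Icc n0 n_max :=
      Finset.eq_of_subset_of_card_le hsub hcards
    have hnS : n ∈ S := by
      rw [← List.mem_toFinset, heq]
      exact Finset.mem_Icc.mpr ⟨by omega, hn.2⟩
    rw [hS, List.mem_filter, List.mem_dedup, List.mem_map] at hnS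
    obtain ⟨⟨p, hp, hp1⟩, _⟩ := hnS
    have := hok p hp (by omega) (by omega)
    rwa [hp1] at this

lemma foldA_eq (b_lists : List (Int × List Int)) :
    ∀ (ns : List Int) (r : Int) (acc : List Int),
      (∀ n ∈ ns, pvOkList ((PySem.Dict.mk b_lists).get? n) = true) →
      ns.foldl (fun (st : List Int × Int) (n : Int) =>
          let b_n := greedy_digit st.2 (((PySem.Dict.mk b_lists).get? n).getD [])
          (st.1 ++ [b_n], st.2 - b_n)) (acc, r)
        = (acc ++ (pvRun b_lists r ns).1, (pvRun b_lists r ns).2) := by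
  intro ns
  induction ns with
  | nil => intro r acc _; simp [pvRun]
  | cons n t ih =>
    intro r acc hok
    have hn := hok n (List.mem_cons_self)
    have ht : ∀ x ∈ t, pvOkList ((PySem.Dict.mk b_lists).get? x) = true :=
      fun x hx => hok x (List.mem_cons_of_mem _ hx)
    obtain ⟨l, hl⟩ : ∃ l, (PySem.Dict.mk b_lists).get? n = some l := by
      cases h : (PySem.Dict.mk b_lists).get? n with
      | none => rw [h] at hn; simp [pvOkList] at hn
      | some l => exact ⟨l, rfl⟩
    rw [hl] at hn
    simp only [pvOkList, Bool.and_eq_true, Bool.not_eq_true', decide_eq_true_eq] at hn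
    have hdg : greedy_digit r l = pickDigit r l :=
      greedy_digit_eq_pickDigit r l (by simpa [List.isEmpty_iff] using hn.1) hn.2
    simp only [List.foldl_cons, pvRun, hl, Option.getD_some, hdg]
    rw [ih _ _ ht]
    simp

lemma foldB_eq (b_lists : List (Int × List Int)) :
    ∀ (ns : List Int) (r : Int) (acc : List Int),
      ns.foldl (fun (st : List Int × Int) (n : Int) =>
          let d := pickDigit st.2 (((PySem.Dict.mk b_lists).get? n).getD [])
          (d :: st.1, st.2 - d)) (acc, r)
        = ((pvRun b_lists r ns).1.reverse ++ acc, (pvRun b_lists r ns).2) := by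
  intro ns
  induction ns with
  | nil => intro r acc; simp [pvRun]
  | cons n t ih =>
    intro r acc
    simp only [List.foldl_cons, pvRun]
    rw [ih]
    simp

-- ===== VERDICT (by name: the statement is the Claim_ definition above) =====
theorem greedy_expansion_spec : Claim_equal_greedy_expansion := by
  intro m n0 n_max b_lists _hdom hpre
  unfold Spec_greedy_expansion greedy_expansion greedy_expansion_alt
  have hpre' := pre_to_range n0 n_max b_lists (by
    rcases hpre with h | h
    · exact Or.inl h
    · exact Or.inr h)
  rw [foldA_eq b_lists _ m [] hpre', foldB_eq b_lists _ m []]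
  simp
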